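-- pv_equiv track=rewrite | github.com/Yeop-Dong/CodingTest_Study | 프로그래머스/2/150368. 이모티콘 할인행사/이모티콘 할인행사.py | calc
-- ===== SOURCE A (Python) =====
-- def calc(users, emoticons, discounts):
--     sub, sale = 0, 0
--     for user in users:
--         cur = 0
--         for i in range(len(emoticons)):
--             if user[0] <= discounts[i]:
--                 cur += emoticons[i] // 100 * (100 - discounts[i])
--         if user[1] <= cur:
--             sub += 1
--         else:
--             sale += cur
--     return sub, sale
-- ===== SOURCE B (Python) =====
-- def calc(users, emoticons, discounts):
--     # Sort-and-sweep: precompute (discount, gain) pairs sorted by discount descending,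
--     # sort users by limit descending, then one merged two-pointer sweep with a running
--     # prefix sum gives each user's total in amortized O(1); sub/sale are order-independent.
--     pairs = []
--     for i in range(len(emoticons)):
--         d = discounts[i]
--         pairs.append((d, emoticons[i] // 100 * (100 - d)))
--     pairs.sort(key=lambda p: p[0], reverse=True)
--     sub, sale, j, running = 0, 0, 0, 0
--     for limit, price in sorted(users, key=lambda u: u[0], reverse=True):
--         while j < len(pairs) and limit <= pairs[j][0]:
--             running += pairs[j][1]
--             j += 1
--         if price <= running:
--             sub += 1
--         else:
--             sale += running
--     return sub, sale
-- ===== Notes on version B (the rewrite author's own statement) =====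
-- stated objective: faster
-- what changed: Replaces A's O(n*m) nested loops by sort-and-sweep: gains are bucketed into (discount, gain) pairs sorted by discount descending, users are sorted by limit descending, and a single two-pointer sweep maintains a running prefix sum so each user's total costs amortized O(1); sub/sale are a count and a sum, hence independent of user order.
-- outside the precondition, e.g. on calc([], [100], []): A returns (0, 0), B raises IndexError
import Mathlib
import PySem

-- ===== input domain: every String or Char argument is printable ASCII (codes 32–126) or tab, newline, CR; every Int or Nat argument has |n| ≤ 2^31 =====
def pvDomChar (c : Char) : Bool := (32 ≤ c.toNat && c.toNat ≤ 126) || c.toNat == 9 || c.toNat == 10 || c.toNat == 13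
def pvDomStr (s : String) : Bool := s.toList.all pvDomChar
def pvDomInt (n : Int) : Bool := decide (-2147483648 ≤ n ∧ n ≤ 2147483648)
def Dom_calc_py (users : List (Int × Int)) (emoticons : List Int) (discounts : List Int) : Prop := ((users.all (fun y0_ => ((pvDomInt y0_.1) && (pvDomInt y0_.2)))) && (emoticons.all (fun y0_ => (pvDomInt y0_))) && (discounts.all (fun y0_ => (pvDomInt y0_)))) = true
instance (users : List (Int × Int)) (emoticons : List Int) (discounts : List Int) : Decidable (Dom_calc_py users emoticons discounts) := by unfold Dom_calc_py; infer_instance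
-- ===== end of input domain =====

-- B replaces A's nested O(n·m) loops by sort-and-sweep: (discount, gain) pairs sorted by
-- discount descending, users sorted by limit descending, one running-prefix-sum sweep.

-- ===== PORT A =====
def calc_py (users : List (Int × Int)) (emoticons : List Int) (discounts : List Int) : Int × Int :=
  users.foldl (fun acc user =>
    let cur : Int := (PySem.List.pyRange 0 (emoticons.length : Int) 1).foldl
      (fun cur i =>
        if user.1 ≤ PySem.List.pyGetD discounts i 0 then
          cur + PySem.Int.floordiv (PySem.List.pyGetD emoticons i 0) 100 * (100 - PySem.List.pyGetD discounts i 0)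
        else cur) 0
    if user.2 ≤ cur then (acc.1 + 1, acc.2) else (acc.1, acc.2 + cur))
    (0, 0)

-- ===== PORT B =====
/-- The inner `while` loop of Source B: advance `j` over the descending-sorted pairs while
`limit <= pairs[j][0]`, adding the gains to `running`. `fuel` is only a structural
totality guard; with `fuel = pairs.length - j` (as `pvSweep` passes) it never runs out. -/
def pvSweepGo (pairs : List (Int × Int)) (limit : Int) : Nat → Nat → Int → Nat × Int
  | 0, j, running => (j, running)
  | fuel + 1, j, running =>
    if h : j < pairs.length then
      if limit ≤ (pairs[j]'h).1 then pvSweepGo pairs limit fuel (j + 1) (running + (pairs[j]'h).2)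
      else (j, running)
    else (j, running)

def pvSweep (pairs : List (Int × Int)) (limit : Int) (j : Nat) (running : Int) : Nat × Int :=
  pvSweepGo pairs limit (pairs.length - j) j running

def calc_py_alt (users : List (Int × Int)) (emoticons : List Int) (discounts : List Int) : Int × Int :=
  let pairs : List (Int × Int) :=
    (PySem.List.pyRange 0 (emoticons.length : Int) 1).foldl
      (fun acc i =>
        let d := PySem.List.pyGetD discounts i 0
        acc ++ [(d, PySem.Int.floordiv (PySem.List.pyGetD emoticons i 0) 100 * (100 - d))]) []
  let sp := PySem.List.sorted pairs Prod.fst true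
  let su := PySem.List.sorted users Prod.fst true
  let fin : Int × Int × Nat × Int := su.foldl
    (fun st u =>
      let jr := pvSweep sp u.1 st.2.2.1 st.2.2.2
      if u.2 ≤ jr.2 then (st.1 + 1, st.2.1, jr.1, jr.2)
      else (st.1, st.2.1 + jr.2, jr.1, jr.2))
    (0, 0, 0, 0)
  (fin.1, fin.2.1)

-- ===== PRECONDITION & SPEC =====
-- A indexes discounts[i] for every i < len(emoticons) once users is nonempty, so it raises
-- IndexError when discounts is shorter than emoticons; B builds its pairs list the same way
-- and raises there too (even for empty users, where A happens to return (0,0) without ever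
-- touching discounts — that accidental short-circuit value is excluded here as well).
def Pre_calc_py (users : List (Int × Int)) (emoticons : List Int) (discounts : List Int) : Prop :=
  emoticons.length ≤ discounts.length
instance (users : List (Int × Int)) (emoticons : List Int) (discounts : List Int) : Decidable (Pre_calc_py users emoticons discounts) := by unfold Pre_calc_py; infer_instance

def pvWitness_calc_py : (List (Int × Int)) × List Int × List Int :=
  ([(30, 100), (40, 5000)], ([3000, 500], [40, 30]))

def Spec_calc_py (users : List (Int × Int)) (emoticons : List Int) (discounts : List Int) (out : Int × Int) : Prop := out = calc_py_alt users emoticons discounts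
instance (users : List (Int × Int)) (emoticons : List Int) (discounts : List Int) (out : Int × Int) : Decidable (Spec_calc_py users emoticons discounts out) := by unfold Spec_calc_py; infer_instance

-- ===== CLAIM =====
def Claim_equal_calc_py : Prop := ∀ (users : List (Int × Int)) (emoticons : List Int) (discounts : List Int), Dom_calc_py users emoticons discounts → Pre_calc_py users emoticons discounts → Spec_calc_py users emoticons discounts (calc_py users emoticons discounts)

-- ===== LEMMAS AND PROOFS =====

/-- Discounted gain of an (emoticon, discount) pair. -/
def pvGain (p : Int × Int) : Int := PySem.Int.floordiv p.1 100 * (100 - p.2)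

/-- Total gain available to a user with limit `L`, over the aligned (emoticon, discount) pairs. -/
def pvT (ed : List (Int × Int)) (L : Int) : Int :=
  ((ed.filter (fun p => decide (L ≤ p.2))).map pvGain).sum

/-- Closed form of the classification pass, for a total function `t` of the user's limit. -/
def pvG (t : Int → Int) (us : List (Int × Int)) : Int × Int :=
  ((us.countP (fun u => decide (u.2 ≤ t u.1)) : Int),
   ((us.filter (fun u => !decide (u.2 ≤ t u.1))).map (fun u => t u.1)).sum)

/-- A's inner indexed loop equals `pvT` over the aligned pairs, when indices are in range. -/
theorem pv_inner (emoticons discounts : List Int) (limit : Int)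
    (h : emoticons.length ≤ discounts.length) :
    (PySem.List.pyRange 0 (emoticons.length : Int) 1).foldl
      (fun cur i =>
        if limit ≤ PySem.List.pyGetD discounts i 0 then
          cur + PySem.Int.floordiv (PySem.List.pyGetD emoticons i 0) 100 * (100 - PySem.List.pyGetD discounts i 0)
        else cur) 0
    = pvT (emoticons.zip discounts) limit := by
  have hlen : (emoticons.zip discounts).length = emoticons.length := by
    simp [List.length_zip]; omega
  have hcongr :
      (PySem.List.pyRange 0 (emoticons.length : Int) 1).foldl
        (fun cur i =>
          if limit ≤ PySem.List.pyGetD discounts i 0 then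
            cur + PySem.Int.floordiv (PySem.List.pyGetD emoticons i 0) 100 * (100 - PySem.List.pyGetD discounts i 0)
          else cur) 0
      = (PySem.List.pyRange 0 (((emoticons.zip discounts).length : Int)) 1).foldl
        (fun cur i =>
          (fun (c : Int) (p : Int × Int) => if limit ≤ p.2 then c + pvGain p else c) cur
            (PySem.List.pyGetD (emoticons.zip discounts) i (0, 0))) 0 := by
    rw [hlen]
    apply PySem.List.foldl_congr_mem
    intro acc i hi
    have hmem := (PySem.List.mem_pyRange_one).1 hi
    have h0 : 0 ≤ i := hmem.1
    have h1 : i < (emoticons.length : Int) := hmem.2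
    rw [PySem.List.pyGetD_eq_getElem discounts (0:Int) h0 (by omega),
        PySem.List.pyGetD_eq_getElem emoticons (0:Int) h0 (by omega),
        PySem.List.pyGetD_eq_getElem (emoticons.zip discounts) ((0:Int),(0:Int)) h0 (by omega)]
    simp [List.getElem_zip, pvGain]
  rw [hcongr,
      PySem.List.foldl_pyRange_zero_pyGetD' (emoticons.zip discounts) (0, 0)
        (fun c p => if limit ≤ p.2 then c + pvGain p else c) 0,
      PySem.List.foldl_ite_eq_foldl_filter, PySem.List.foldl_add, pvT]
  simp

/-- A's outer loop in closed form. -/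
theorem pv_foldA (t : Int → Int) (us : List (Int × Int)) (a b : Int) :
    us.foldl (fun acc u => if u.2 ≤ t u.1 then (acc.1 + 1, acc.2) else (acc.1, acc.2 + t u.1)) (a, b)
      = (a + (pvG t us).1, b + (pvG t us).2) := by
  induction us generalizing a b with
  | nil => simp [pvG]
  | cons u tl ih =>
    simp only [List.foldl_cons]
    by_cases h : u.2 ≤ t u.1
    · rw [if_pos h, ih]
      simp only [pvG, List.countP_cons, List.filter_cons, h, Prod.ext_iff]
      simp
      push_cast
      ring
    · rw [if_neg h, ih]
      simp only [pvG, List.countP_cons, List.filter_cons, h, Prod.ext_iff]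
      simp
      ring

/-- `pvG` only depends on the multiset of users. -/
theorem pv_G_perm (t : Int → Int) (us vs : List (Int × Int)) (h : us.Perm vs) :
    pvG t us = pvG t vs := by
  unfold pvG
  rw [h.countP_eq, ((h.filter _).map _).sum_eq]

/-- `pvT` only depends on the multiset of pairs (as a sum over a filter). -/
theorem pv_sumsnd_perm (p : Int × Int → Bool) (f : Int × Int → Int)
    (xs ys : List (Int × Int)) (h : xs.Perm ys) :
    ((xs.filter p).map f).sum = ((ys.filter p).map f).sum :=
  ((h.filter _).map _).sum_eq

/-- Characterisation of the while loop on a descending-sorted pairs list. -/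
theorem pv_sweepGo (sp : List (Int × Int)) (L : Int) (fuel : Nat) :
    ∀ (j : Nat), sp.length - j ≤ fuel → j ≤ sp.length →
    (∀ k (hk : k < sp.length), k < j → L ≤ (sp[k]'hk).1) →
    ∃ j', pvSweepGo sp L fuel j (((sp.take j).map Prod.snd).sum)
        = (j', ((sp.take j').map Prod.snd).sum)
      ∧ j' ≤ sp.length
      ∧ (∀ k (hk : k < sp.length), k < j' → L ≤ (sp[k]'hk).1)
      ∧ (j' = sp.length ∨ ∃ (h' : j' < sp.length), (sp[j']'h').1 < L) := by
  induction fuel with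
  | zero =>
    intro j hfuel hj hfront
    exact ⟨j, rfl, hj, hfront, Or.inl (by omega)⟩
  | succ fuel ih =>
    intro j hfuel hj hfront
    by_cases h : j < sp.length
    · by_cases hle : L ≤ (sp[j]'h).1
      · have hrec := ih (j + 1) (by omega) (by omega)
          (fun k hk hkj => by
            rcases Nat.lt_succ_iff_lt_or_eq.1 hkj with hk' | hk'
            · exact hfront k hk hk'
            · subst hk'; exact hle)
        have hsum : ((sp.take (j + 1)).map Prod.snd).sum
            = ((sp.take j).map Prod.snd).sum + (sp[j]'h).2 := by
          rw [List.map_take, List.map_take,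
              List.sum_take_succ (sp.map Prod.snd) j (by simpa using h)]
          simp
        obtain ⟨j', hrun, hlen', hfr', hstop⟩ := hrec
        refine ⟨j', ?_, hlen', hfr', hstop⟩
        rw [pvSweepGo, dif_pos h, if_pos hle, ← hsum]
        exact hrun
      · exact ⟨j, by rw [pvSweepGo, dif_pos h, if_neg hle], hj,
          (fun k hk hkj => hfront k hk hkj), Or.inr ⟨h, by omega⟩⟩
    · exact ⟨j, by rw [pvSweepGo, dif_neg h], hj,
        (fun k hk hkj => hfront k hk hkj), Or.inl (by omega)⟩

theorem pv_sweep (sp : List (Int × Int)) (hs : sp.Pairwise (fun a b => b.1 ≤ a.1))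
    (L : Int) (j : Nat) (hj : j ≤ sp.length)
    (hfront : ∀ k (hk : k < sp.length), k < j → L ≤ (sp[k]'hk).1) :
    ∃ j', pvSweep sp L j (((sp.take j).map Prod.snd).sum) = (j', ((sp.take j').map Prod.snd).sum)
      ∧ j' ≤ sp.length
      ∧ (∀ k (hk : k < sp.length), k < j' → L ≤ (sp[k]'hk).1)
      ∧ (j' = sp.length ∨ ∃ (h' : j' < sp.length), (sp[j']'h').1 < L) :=
  pv_sweepGo sp L (sp.length - j) j (le_refl _) hj hfront

/-- On a descending-sorted list, the stopped prefix is exactly the filter. -/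
theorem pv_take_eq_filter (sp : List (Int × Int)) (hs : sp.Pairwise (fun a b => b.1 ≤ a.1))
    (L : Int) (j : Nat) (hj : j ≤ sp.length)
    (hfront : ∀ k (hk : k < sp.length), k < j → L ≤ (sp[k]'hk).1)
    (hstop : j = sp.length ∨ ∃ (h' : j < sp.length), (sp[j]'h').1 < L) :
    sp.filter (fun q => decide (L ≤ q.1)) = sp.take j := by
  have hdrop : ∀ k (hk : k < sp.length), j ≤ k → (sp[k]'hk).1 < L := by
    intro k hk hjk
    rcases hstop with h | ⟨h', hlt⟩
    · omega
    · rcases Nat.eq_or_lt_of_le hjk with rfl | hlt'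
      · exact hlt
      · have := (List.pairwise_iff_getElem.1 hs) j k h' hk hlt'
        omega
  conv_lhs => rw [← List.take_append_drop j sp]
  rw [List.filter_append]
  have h1 : (sp.take j).filter (fun q => decide (L ≤ q.1)) = sp.take j := by
    apply List.filter_eq_self.2
    intro q hq
    obtain ⟨k, hk, rfl⟩ := List.getElem_of_mem hq
    have hk' : k < j ∧ k < sp.length := by
      have := hk; simp only [List.length_take] at this; omega
    rw [List.getElem_take]
    simpa using hfront k hk'.2 hk'.1
  have h2 : (sp.drop j).filter (fun q => decide (L ≤ q.1)) = [] := by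
    apply List.filter_eq_nil_iff.2
    intro q hq
    obtain ⟨k, hk, rfl⟩ := List.getElem_of_mem hq
    have hk' : j + k < sp.length := by
      have := hk; simp only [List.length_drop] at this; omega
    rw [List.getElem_drop]
    simpa using hdrop (j + k) hk' (by omega)
  rw [h1, h2, List.append_nil]

/-- The outer sweep over a descending user list computes `pvG` of the filtered sums. -/
theorem pv_outer (sp : List (Int × Int)) (hs : sp.Pairwise (fun a b => b.1 ≤ a.1))
    (us : List (Int × Int)) (hu : us.Pairwise (fun a b => b.1 ≤ a.1))
    (a b : Int) (j : Nat) (hj : j ≤ sp.length)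
    (hfront : ∀ u ∈ us, ∀ k (hk : k < sp.length), k < j → u.1 ≤ (sp[k]'hk).1) :
    us.foldl
      (fun st u =>
        let jr := pvSweep sp u.1 st.2.2.1 st.2.2.2
        if u.2 ≤ jr.2 then (st.1 + 1, st.2.1, jr.1, jr.2)
        else (st.1, st.2.1 + jr.2, jr.1, jr.2))
      (a, b, j, ((sp.take j).map Prod.snd).sum)
    = (a + (pvG (fun L => ((sp.filter (fun q => decide (L ≤ q.1))).map Prod.snd).sum) us).1,
       b + (pvG (fun L => ((sp.filter (fun q => decide (L ≤ q.1))).map Prod.snd).sum) us).2,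
       ((us.foldl
        (fun st u =>
          let jr := pvSweep sp u.1 st.2.2.1 st.2.2.2
          if u.2 ≤ jr.2 then (st.1 + 1, st.2.1, jr.1, jr.2)
          else (st.1, st.2.1 + jr.2, jr.1, jr.2))
        (a, b, j, ((sp.take j).map Prod.snd).sum)).2.2)) := by
  induction us generalizing a b j with
  | nil => simp [pvG]
  | cons u tl ih =>
    obtain ⟨j', hrun, hj', hfr', hstop⟩ :=
      pv_sweep sp hs u.1 j hj (hfront u (List.mem_cons_self ..) )
    have hfilter := pv_take_eq_filter sp hs u.1 j' hj' hfr' hstop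
    have hval : ((sp.take j').map Prod.snd).sum
        = ((sp.filter (fun q => decide (u.1 ≤ q.1))).map Prod.snd).sum := by rw [hfilter]
    have hfront' : ∀ v ∈ tl, ∀ k (hk : k < sp.length), k < j' → v.1 ≤ (sp[k]'hk).1 := by
      intro v hv k hk hkj
      have h1 : v.1 ≤ u.1 := (List.pairwise_cons.1 hu).1 v hv
      exact le_trans h1 (hfr' k hk hkj)
    have htl := List.pairwise_cons.1 hu |>.2
    simp only [List.foldl_cons, hrun]
    by_cases hcase : u.2 ≤ ((sp.take j').map Prod.snd).sum
    · rw [if_pos hcase]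
      rw [ih htl (a + 1) b j' hj' hfront']
      have hP : decide (u.2 ≤ ((sp.filter (fun q => decide (u.1 ≤ q.1))).map Prod.snd).sum) = true := by
        rw [← hval]; simpa using hcase
      simp only [pvG, List.countP_cons, List.filter_cons, hP, Prod.mk.injEq]
      refine ⟨?_, ?_, ?_⟩
      · simp
        push_cast
        ring
      · simp
      · first | rfl | trivial
    · rw [if_neg hcase]
      rw [ih htl a (b + ((sp.take j').map Prod.snd).sum) j' hj' hfront']
      have hP : decide (u.2 ≤ ((sp.filter (fun q => decide (u.1 ≤ q.1))).map Prod.snd).sum) = false := by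
        rw [← hval]; simpa using hcase
      have hval2 : (List.take j' (sp.map Prod.snd)).sum
          = ((sp.filter (fun q => decide (u.1 ≤ q.1))).map Prod.snd).sum := by
        rw [← List.map_take]; exact hval
      simp only [pvG, List.countP_cons, List.filter_cons, hP, Prod.mk.injEq]
      refine ⟨?_, ?_, ?_⟩
      · simp
      · simp [hval2]
        ring
      · first | rfl | trivial

/-- B's pair-building loop equals the mapped zip, when indices are in range. -/
theorem pv_pairs (emoticons discounts : List Int)
    (h : emoticons.length ≤ discounts.length) :
    (PySem.List.pyRange 0 (emoticons.length : Int) 1).foldl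
      (fun acc i =>
        let d := PySem.List.pyGetD discounts i 0
        acc ++ [(d, PySem.Int.floordiv (PySem.List.pyGetD emoticons i 0) 100 * (100 - d))]) []
    = (emoticons.zip discounts).map (fun p => (p.2, pvGain p)) := by
  have hlen : (emoticons.zip discounts).length = emoticons.length := by
    simp [List.length_zip]; omega
  have hcongr :
      (PySem.List.pyRange 0 (emoticons.length : Int) 1).foldl
        (fun acc i =>
          let d := PySem.List.pyGetD discounts i 0
          acc ++ [(d, PySem.Int.floordiv (PySem.List.pyGetD emoticons i 0) 100 * (100 - d))]) []
      = (PySem.List.pyRange 0 (((emoticons.zip discounts).length : Int)) 1).foldl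
        (fun acc i =>
          (fun (acc : List (Int × Int)) (p : Int × Int) => acc ++ [(p.2, pvGain p)]) acc
            (PySem.List.pyGetD (emoticons.zip discounts) i (0, 0))) [] := by
    rw [hlen]
    apply PySem.List.foldl_congr_mem
    intro acc i hi
    have hmem := (PySem.List.mem_pyRange_one).1 hi
    have h0 : 0 ≤ i := hmem.1
    have h1 : i < (emoticons.length : Int) := hmem.2
    rw [PySem.List.pyGetD_eq_getElem discounts (0:Int) h0 (by omega),
        PySem.List.pyGetD_eq_getElem emoticons (0:Int) h0 (by omega),
        PySem.List.pyGetD_eq_getElem (emoticons.zip discounts) ((0:Int),(0:Int)) h0 (by omega)]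
    simp [List.getElem_zip, pvGain]
  rw [hcongr,
      PySem.List.foldl_pyRange_zero_pyGetD' (emoticons.zip discounts) (0, 0)
        (fun acc p => acc ++ [(p.2, pvGain p)]) [],
      PySem.List.foldl_append_singleton_eq_map]
  simp

-- ===== VERDICT =====
theorem calc_py_spec : Claim_equal_calc_py := by
  intro users emoticons discounts _ hpre
  unfold Spec_calc_py
  unfold Pre_calc_py at hpre
  -- both sides in closed form
  have ed := emoticons.zip discounts
  -- A side
  have hA : calc_py users emoticons discounts
      = ((pvG (pvT (emoticons.zip discounts)) users).1, (pvG (pvT (emoticons.zip discounts)) users).2) := by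
    unfold calc_py
    have := PySem.List.foldl_congr_mem users
      (fun acc user =>
        let cur : Int := (PySem.List.pyRange 0 (emoticons.length : Int) 1).foldl
          (fun cur i =>
            if user.1 ≤ PySem.List.pyGetD discounts i 0 then
              cur + PySem.Int.floordiv (PySem.List.pyGetD emoticons i 0) 100 * (100 - PySem.List.pyGetD discounts i 0)
            else cur) 0
        if user.2 ≤ cur then (acc.1 + 1, acc.2) else (acc.1, acc.2 + cur))
      (fun acc user =>
        if user.2 ≤ pvT (emoticons.zip discounts) user.1 then (acc.1 + 1, acc.2)
        else (acc.1, acc.2 + pvT (emoticons.zip discounts) user.1))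
      ((0 : Int), (0 : Int))
      (by intro acc user _; simp only [pv_inner emoticons discounts user.1 hpre])
    rw [this, pv_foldA]
    simp
  -- B side
  have hB : calc_py_alt users emoticons discounts
      = ((pvG (pvT (emoticons.zip discounts)) users).1, (pvG (pvT (emoticons.zip discounts)) users).2) := by
    unfold calc_py_alt
    simp only [pv_pairs emoticons discounts hpre]
    set pairsB := (emoticons.zip discounts).map (fun p => (p.2, pvGain p)) with hpairsB
    set sp := PySem.List.sorted pairsB Prod.fst true with hsp
    set su := PySem.List.sorted users Prod.fst true with hsu
    have hs : sp.Pairwise (fun a b => b.1 ≤ a.1) := PySem.List.sorted_pairwise_rev pairsB Prod.fst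
    have hu : su.Pairwise (fun a b => b.1 ≤ a.1) := PySem.List.sorted_pairwise_rev users Prod.fst
    have houter := pv_outer sp hs su hu 0 0 0 (by omega) (by intro u _ k hk hc; omega)
    simp only [List.take_zero, List.map_nil, List.sum_nil] at houter
    rw [houter]
    -- identify the per-user total with pvT, and permute users back
    have htfun : (fun L => ((sp.filter (fun q => decide (L ≤ q.1))).map Prod.snd).sum)
        = pvT (emoticons.zip discounts) := by
      funext L
      have hperm : sp.Perm pairsB := PySem.List.sorted_perm pairsB Prod.fst true
      rw [pv_sumsnd_perm _ _ sp pairsB hperm, hpairsB, pvT]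
      rw [List.filter_map, List.map_map]
      simp [Function.comp_def]
    rw [htfun, pv_G_perm (pvT (emoticons.zip discounts)) su users
      (PySem.List.sorted_perm users Prod.fst true)]
    simp
  rw [hA, hB]
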